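-- pv_equiv track=rewrite | github.com/mhycheung/jaxqualin | jaxqualin/qnmode.py | quadratic_modes_matching_m
-- ===== SOURCE A (Python) =====
-- def quadratic_modes_matching_m(
--         m,
--         relevant_lm_list_unsorted,
--         quadratic_n_max=1,
--         retro=False):
--     relevant_lm_list = sorted(relevant_lm_list_unsorted)
--     quad_mode_list = []
--     relevant_length = len(relevant_lm_list)
--     for i in range(relevant_length):
--         l1, m1 = relevant_lm_list[i]
--         for j in range(i + 1):
--             l2, m2 = relevant_lm_list[j]
--             for n1 in range(quadratic_n_max + 1):
--                 if i == j:
--                     quadratic_n_max2 = n1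
--                 else:
--                     quadratic_n_max2 = quadratic_n_max
--                 for n2 in range(quadratic_n_max2 + 1):
--                     if m1 + m2 == m:
--                         lmnx = sorted([[l2, m2, n2], [l1, m1, n1]])
--                         quad_mode_list.append(lmnx)
--     return quad_mode_list
-- ===== SOURCE B (Python) =====
-- def quadratic_modes_matching_m(
--         m,
--         relevant_lm_list_unsorted,
--         quadratic_n_max=1,
--         retro=False):
--     # Index the sorted modes by their m-value as we sweep left to right: for
--     # each i we retrieve ONLY the partners j <= i with m2 = m - m1, instead of
--     # scanning all j and testing m1 + m2 == m inside the innermost loop.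
--     rel = sorted(relevant_lm_list_unsorted)
--     by_m = {}
--     out = []
--     for i, (l1, m1) in enumerate(rel):
--         by_m[m1] = by_m.get(m1, []) + [(i, l1)]
--         m2 = m - m1
--         for j, l2 in by_m.get(m2, []):
--             for n1 in range(quadratic_n_max + 1):
--                 top = n1 if i == j else quadratic_n_max
--                 for n2 in range(top + 1):
--                     out.append(sorted([[l2, m2, n2], [l1, m1, n1]]))
--     return out
-- ===== Notes on version B (the rewrite author's own statement) =====
-- stated objective: faster
-- what changed: Instead of scanning all pairs (i,j) and testing m1+m2==m inside the innermost n-loop, B sweeps the sorted list once while indexing seen entries in a dict keyed by m-value, so for each i it iterates only over the partners j<=i with m2=m-m1.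
import Mathlib
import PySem

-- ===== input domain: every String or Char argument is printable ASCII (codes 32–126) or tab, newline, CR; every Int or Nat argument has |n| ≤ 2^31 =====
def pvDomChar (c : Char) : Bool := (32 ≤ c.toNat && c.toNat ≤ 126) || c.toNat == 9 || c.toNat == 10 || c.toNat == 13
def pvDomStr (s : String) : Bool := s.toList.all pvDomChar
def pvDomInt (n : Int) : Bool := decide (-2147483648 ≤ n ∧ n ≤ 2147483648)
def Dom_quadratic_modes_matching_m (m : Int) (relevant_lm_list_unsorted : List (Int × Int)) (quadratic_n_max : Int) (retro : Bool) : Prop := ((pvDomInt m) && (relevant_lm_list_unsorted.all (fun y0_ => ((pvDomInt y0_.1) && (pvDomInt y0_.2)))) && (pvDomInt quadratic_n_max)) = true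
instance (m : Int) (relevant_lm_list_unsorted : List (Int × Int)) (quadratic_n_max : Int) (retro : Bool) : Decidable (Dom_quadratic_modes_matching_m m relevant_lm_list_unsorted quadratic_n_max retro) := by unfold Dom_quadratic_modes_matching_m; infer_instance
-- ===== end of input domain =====

-- B replaces A's scan of all pairs (i,j) with the m1+m2==m test in the innermost loop by a
-- single sweep that indexes seen entries in a dict keyed by m-value (objective: faster).

-- Shared helpers of both Pythons: Python's `<` on lists of ints (lexicographic), exact.
def pyListLt : List Int → List Int → Bool
  | [], [] => false
  | [], _ :: _ => true
  | _ :: _, [] => false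
  | a :: as, b :: bs => if a < b then true else if b < a then false else pyListLt as bs

-- `sorted([x, y])` for two lists of ints: stable two-element sort, exact.
def sort2 (x y : List Int) : List (List Int) := if pyListLt y x then [y, x] else [x, y]

-- ===== PORT A =====
def quadratic_modes_matching_m (m : Int) (relevant_lm_list_unsorted : List (Int × Int)) (quadratic_n_max : Int) (retro : Bool) : List (List (List Int)) :=
  let relevant_lm_list := PySem.List.sorted2 relevant_lm_list_unsorted (·.1) (·.2)
  (PySem.List.pyRange 0 (PySem.List.len relevant_lm_list) 1).foldl (fun acc i =>
    let (l1, m1) := PySem.List.pyGetD relevant_lm_list i (0, 0)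
    (PySem.List.pyRange 0 (i + 1) 1).foldl (fun acc j =>
      let (l2, m2) := PySem.List.pyGetD relevant_lm_list j (0, 0)
      (PySem.List.pyRange 0 (quadratic_n_max + 1) 1).foldl (fun acc n1 =>
        let quadratic_n_max2 := if i == j then n1 else quadratic_n_max
        (PySem.List.pyRange 0 (quadratic_n_max2 + 1) 1).foldl (fun acc n2 =>
          if m1 + m2 == m then acc ++ [sort2 [l2, m2, n2] [l1, m1, n1]] else acc) acc) acc) acc) []

-- ===== PORT B =====
def quadratic_modes_matching_m_alt (m : Int) (relevant_lm_list_unsorted : List (Int × Int)) (quadratic_n_max : Int) (retro : Bool) : List (List (List Int)) :=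
  let rel := PySem.List.sorted2 relevant_lm_list_unsorted (·.1) (·.2)
  ((PySem.List.enumerate rel 0).foldl
    (fun (st : PySem.Dict Int (List (Int × Int)) × List (List (List Int))) p =>
      let (i, (l1, m1)) := p
      -- by_m[m1] = by_m.get(m1, []) + [(i, l1)]
      let by_m := st.1.modify m1 [] (· ++ [(i, l1)])
      let m2 := m - m1
      let out := (by_m.getD m2 []).foldl (fun out jl =>
        let (j, l2) := jl
        (PySem.List.pyRange 0 (quadratic_n_max + 1) 1).foldl (fun out n1 =>
          let top := if i == j then n1 else quadratic_n_max
          (PySem.List.pyRange 0 (top + 1) 1).foldl (fun out n2 =>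
            out ++ [sort2 [l2, m2, n2] [l1, m1, n1]]) out) out) st.2
      (by_m, out))
    (PySem.Dict.empty, [])).2

-- ===== PRECONDITION & SPEC =====
def Spec_quadratic_modes_matching_m (m : Int) (relevant_lm_list_unsorted : List (Int × Int)) (quadratic_n_max : Int) (retro : Bool) (out : List (List (List Int))) : Prop := out = quadratic_modes_matching_m_alt m relevant_lm_list_unsorted quadratic_n_max retro
instance (m : Int) (relevant_lm_list_unsorted : List (Int × Int)) (quadratic_n_max : Int) (retro : Bool) (out : List (List (List Int))) : Decidable (Spec_quadratic_modes_matching_m m relevant_lm_list_unsorted quadratic_n_max retro out) := by unfold Spec_quadratic_modes_matching_m; infer_instance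

-- ===== CLAIM (what is proved, stated in full; the proofs are below) =====
def Claim_equal_quadratic_modes_matching_m : Prop := ∀ (m : Int) (relevant_lm_list_unsorted : List (Int × Int)) (quadratic_n_max : Int) (retro : Bool), Dom_quadratic_modes_matching_m m relevant_lm_list_unsorted quadratic_n_max retro → Spec_quadratic_modes_matching_m m relevant_lm_list_unsorted quadratic_n_max retro (quadratic_modes_matching_m m relevant_lm_list_unsorted quadratic_n_max retro)

-- ===== LEMMAS AND PROOFS =====

-- The n1/n2 double loop, as a flat list (common to both sides).
def nloops (qn i j l1 m1 l2 m2 : Int) : List (List (List Int)) :=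
  (PySem.List.pyRange 0 (qn + 1) 1).flatMap (fun n1 =>
    (PySem.List.pyRange 0 ((if i == j then n1 else qn) + 1) 1).map (fun n2 =>
      sort2 [l2, m2, n2] [l1, m1, n1]))

-- What one element p = (i, (l1, m1)) contributes, given the list `pref` of entries seen so far.
def piece (m qn : Int) (pref : List (Int × (Int × Int))) (p : Int × (Int × Int)) : List (List (List Int)) :=
  ((pref.filter (fun q => q.2.2 == m - p.2.2)).map (fun q => (q.1, q.2.1))).flatMap
    (fun jl => nloops qn p.1 jl.1 p.2.1 p.2.2 jl.2 (m - p.2.2))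

-- The entries with indices 0..i of the sorted list, with their indices.
def prefixE (rel : List (Int × Int)) (i : Int) : List (Int × (Int × Int)) :=
  (PySem.List.pyRange 0 (i + 1) 1).map (fun j => (j, PySem.List.pyGetD rel j (0, 0)))

-- The common normal form of both outputs.
def specOut (m qn : Int) (rel : List (Int × Int)) : List (List (List Int)) :=
  (PySem.List.pyRange 0 (PySem.List.len rel) 1).flatMap
    (fun i => piece m qn (prefixE rel i) (i, PySem.List.pyGetD rel i (0, 0)))

theorem flatMap_if_eq_filter_flatMap {α β : Type} (l : List α) (p : α → Bool) (f : α → List β) :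
    l.flatMap (fun x => if p x then f x else []) = (l.filter p).flatMap f := by
  induction l with
  | nil => rfl
  | cons x xs ih =>
    by_cases h : p x <;> simp [h, ih]

-- The unconditional n1/n2 double fold appends exactly `nloops`.
theorem nfold_eq (qn i j l1 m1 l2 m2 : Int) (out : List (List (List Int))) :
    (PySem.List.pyRange 0 (qn + 1) 1).foldl (fun out n1 =>
      (PySem.List.pyRange 0 ((if i == j then n1 else qn) + 1) 1).foldl (fun out n2 =>
        out ++ [sort2 [l2, m2, n2] [l1, m1, n1]]) out) out
    = out ++ nloops qn i j l1 m1 l2 m2 := by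
  simp only [PySem.List.foldl_append_singleton_eq_map, PySem.List.foldl_append_eq_flatMap, nloops]

-- A's innermost double fold, with the membership test inside.
theorem inner_eq (m qn i j l1 m1 l2 m2 : Int) (acc : List (List (List Int))) :
    (PySem.List.pyRange 0 (qn + 1) 1).foldl (fun acc n1 =>
      (PySem.List.pyRange 0 ((if i == j then n1 else qn) + 1) 1).foldl (fun acc n2 =>
        if m1 + m2 == m then acc ++ [sort2 [l2, m2, n2] [l1, m1, n1]] else acc) acc) acc
    = acc ++ (if m1 + m2 == m then nloops qn i j l1 m1 l2 m2 else []) := by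
  by_cases h : (m1 + m2 == m) = true
  · simp only [h, if_true]
    exact nfold_eq qn i j l1 m1 l2 m2 acc
  · simp only [Bool.not_eq_true] at h
    simp [h]

-- A's j-loop (from `acc`) contributes exactly `piece` of the indexed prefix.
theorem jloop_eq (m qn : Int) (rel : List (Int × Int)) (i l1 m1 : Int)
    (hp : PySem.List.pyGetD rel i (0, 0) = (l1, m1)) :
    (PySem.List.pyRange 0 (i + 1) 1).flatMap (fun j =>
      if m1 + (PySem.List.pyGetD rel j (0, 0)).2 == m then
        nloops qn i j l1 m1 (PySem.List.pyGetD rel j (0, 0)).1 (PySem.List.pyGetD rel j (0, 0)).2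
      else [])
    = piece m qn (prefixE rel i) (i, PySem.List.pyGetD rel i (0, 0)) := by
  rw [flatMap_if_eq_filter_flatMap]
  unfold piece prefixE
  rw [hp]
  simp only [List.filter_map, List.map_map, List.flatMap_map, Function.comp_def]
  rw [List.filter_congr (q := fun j => (PySem.List.pyGetD rel j (0, 0)).2 == m - m1)
      (by intro j _
          rw [Bool.eq_iff_iff]
          simp only [beq_iff_eq]
          omega)]
  apply List.flatMap_congr
  intro j hj
  have : ((PySem.List.pyGetD rel j (0, 0)).2 == m - m1) = true := (List.mem_filter.mp hj).2
  simp only [beq_iff_eq] at this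
  simp [this]

-- whole A fold = specOut
theorem A_eq_specOut (m qn : Int) (rel : List (Int × Int)) :
    (PySem.List.pyRange 0 (PySem.List.len rel) 1).foldl (fun acc i =>
      let (l1, m1) := PySem.List.pyGetD rel i (0, 0)
      (PySem.List.pyRange 0 (i + 1) 1).foldl (fun acc j =>
        let (l2, m2) := PySem.List.pyGetD rel j (0, 0)
        (PySem.List.pyRange 0 (qn + 1) 1).foldl (fun acc n1 =>
          let qn2 := if i == j then n1 else qn
          (PySem.List.pyRange 0 (qn2 + 1) 1).foldl (fun acc n2 =>
            if m1 + m2 == m then acc ++ [sort2 [l2, m2, n2] [l1, m1, n1]] else acc) acc) acc) acc) []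
    = specOut m qn rel := by
  rw [PySem.List.foldl_congr_mem
    (g := fun acc i => acc ++ piece m qn (prefixE rel i) (i, PySem.List.pyGetD rel i (0, 0)))]
  · rw [PySem.List.foldl_append_eq_flatMap]
    rfl
  · intro acc i _
    cases hp : PySem.List.pyGetD rel i (0, 0) with
    | mk l1 m1 =>
      simp only
      rw [PySem.List.foldl_congr_mem
        (g := fun acc j => acc ++
          (if m1 + (PySem.List.pyGetD rel j (0, 0)).2 == m then
            nloops qn i j l1 m1 (PySem.List.pyGetD rel j (0, 0)).1 (PySem.List.pyGetD rel j (0, 0)).2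
          else []))]
      · rw [PySem.List.foldl_append_eq_flatMap, jloop_eq m qn rel i l1 m1 hp, hp]
      · intro acc j _
        cases hq : PySem.List.pyGetD rel j (0, 0) with
        | mk l2 m2 =>
          simp only
          rw [inner_eq]

-- ===== B side =====

def bkt (pref : List (Int × (Int × Int))) (v : Int) : List (Int × Int) :=
  (pref.filter (fun q => q.2.2 == v)).map (fun q => (q.1, q.2.1))

theorem bkt_snoc (pref : List (Int × (Int × Int))) (p : Int × (Int × Int)) (v : Int) :
    bkt (pref ++ [p]) v = bkt pref v ++ (if p.2.2 == v then [(p.1, p.2.1)] else []) := by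
  by_cases h : (p.2.2 == v) = true <;>
    simp [bkt, List.filter_append, h]

def goB (m qn : Int) (pref : List (Int × (Int × Int))) :
    List (Int × (Int × Int)) → List (List (List Int))
  | [] => []
  | p :: rs => piece m qn (pref ++ [p]) p ++ goB m qn (pref ++ [p]) rs

theorem B_fold_eq (m qn : Int) (rest : List (Int × (Int × Int))) :
    ∀ (pref : List (Int × (Int × Int))) (d : PySem.Dict Int (List (Int × Int)))
      (out : List (List (List Int))),
    (∀ v, d.getD v [] = bkt pref v) →
    (rest.foldl
      (fun (st : PySem.Dict Int (List (Int × Int)) × List (List (List Int))) p =>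
        let (i, (l1, m1)) := p
        let by_m := st.1.modify m1 [] (· ++ [(i, l1)])
        let m2 := m - m1
        let out := (by_m.getD m2 []).foldl (fun out jl =>
          let (j, l2) := jl
          (PySem.List.pyRange 0 (qn + 1) 1).foldl (fun out n1 =>
            let top := if i == j then n1 else qn
            (PySem.List.pyRange 0 (top + 1) 1).foldl (fun out n2 =>
              out ++ [sort2 [l2, m2, n2] [l1, m1, n1]]) out) out) st.2
        (by_m, out))
      (d, out)).2
    = out ++ goB m qn pref rest := by
  induction rest with
  | nil => intro pref d out _; simp [goB]
  | cons p rs ih =>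
    intro pref d out hd
    obtain ⟨i, l1, m1⟩ := p
    simp only [List.foldl_cons]
    have hd' : ∀ v, (d.modify m1 [] (· ++ [(i, l1)])).getD v [] = bkt (pref ++ [(i, (l1, m1))]) v := by
      intro v
      rw [PySem.Dict.getD_modify, bkt_snoc, hd, hd]
      by_cases hv : v = m1
      · subst hv; simp
      · simp [hv, (by simpa using (Ne.symm hv) : ¬ (m1 == v) = true)]
    have hout : ((d.modify m1 [] (· ++ [(i, l1)])).getD (m - m1) []).foldl (fun out jl =>
          (PySem.List.pyRange 0 (qn + 1) 1).foldl (fun out n1 =>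
            (PySem.List.pyRange 0 ((if i == jl.1 then n1 else qn) + 1) 1).foldl (fun out n2 =>
              out ++ [sort2 [jl.2, m - m1, n2] [l1, m1, n1]]) out) out) out
        = out ++ piece m qn (pref ++ [(i, (l1, m1))]) (i, (l1, m1)) := by
      rw [hd']
      rw [PySem.List.foldl_congr_mem
        (g := fun out jl => out ++ nloops qn i jl.1 l1 m1 jl.2 (m - m1))]
      · rw [PySem.List.foldl_append_eq_flatMap]
        rfl
      · intro acc jl _
        exact nfold_eq qn i jl.1 l1 m1 jl.2 (m - m1) acc
    rw [hout]
    exact (ih (pref ++ [(i, (l1, m1))]) _ _ hd').trans (by simp [goB])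

-- the prefix of the enumeration is `prefixE`
theorem prefixE_eq_take (rel : List (Int × Int)) (k : Nat) (hk : k < rel.length) :
    prefixE rel (k : Int) = (PySem.List.enumerate rel 0).take (k + 1) := by
  apply List.ext_getElem?
  intro j
  by_cases hj : j < k + 1
  · rw [List.getElem?_take_of_lt hj]
    unfold prefixE
    rw [List.getElem?_map, PySem.List.getElem?_pyRange_one, PySem.List.getElem?_enumerate]
    have hjlen : j < rel.length := by omega
    simp [hj, List.getElem?_eq_getElem hjlen, PySem.List.pyGetD_natCast, List.getD]
  · have h1 : (prefixE rel (k:Int)).length = k + 1 := by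
      simp [prefixE, PySem.List.length_pyRange_one]
    have h2 : ((PySem.List.enumerate rel 0).take (k + 1)).length ≤ k + 1 := by
      simp
    rw [List.getElem?_eq_none (by omega), List.getElem?_eq_none (by omega)]

theorem goB_eq (m qn : Int) (rel : List (Int × Int)) (k : Nat) (hk : k ≤ rel.length) :
    goB m qn ((PySem.List.enumerate rel 0).take k) ((PySem.List.enumerate rel 0).drop k)
    = (PySem.List.pyRange (k : Int) (PySem.List.len rel) 1).flatMap
        (fun i => piece m qn (prefixE rel i) (i, PySem.List.pyGetD rel i (0, 0))) := by
  by_cases h : k = rel.length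
  · subst h
    rw [List.drop_of_length_le (by simp), PySem.List.pyRange_one_eq_nil (by simp)]
    rfl
  · have hk' : k < rel.length := by omega
    have hdrop : (PySem.List.enumerate rel 0).drop k
        = ((k : Int), rel[k]) :: (PySem.List.enumerate rel 0).drop (k + 1) := by
      rw [List.drop_eq_getElem_cons (by simpa using hk')]
      congr 1
      rw [PySem.List.getElem_enumerate]
      simp
    have htake : (PySem.List.enumerate rel 0).take k ++ [((k : Int), rel[k])]
        = (PySem.List.enumerate rel 0).take (k + 1) := by
      rw [List.take_add_one]
      congr 1
      rw [List.getElem?_eq_getElem (by simpa using hk'), PySem.List.getElem_enumerate]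
      simp
    rw [hdrop]
    show piece m qn _ _ ++ goB m qn _ _ = _
    rw [htake, goB_eq m qn rel (k + 1) (by omega)]
    rw [PySem.List.pyRange_one_cons (a := (k : Int)) (by rw [PySem.List.len_eq]; exact_mod_cast hk')]
    rw [List.flatMap_cons]
    have hcast : ((k + 1 : Nat) : Int) = (k : Int) + 1 := by push_cast; ring
    rw [hcast]
    congr 1
    rw [prefixE_eq_take rel k hk', PySem.List.pyGetD_natCast]
    simp [List.getD, List.getElem?_eq_getElem hk']

theorem B_eq_specOut (m qn : Int) (rel : List (Int × Int)) :
    ((PySem.List.enumerate rel 0).foldl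
      (fun (st : PySem.Dict Int (List (Int × Int)) × List (List (List Int))) p =>
        let (i, (l1, m1)) := p
        let by_m := st.1.modify m1 [] (· ++ [(i, l1)])
        let m2 := m - m1
        let out := (by_m.getD m2 []).foldl (fun out jl =>
          let (j, l2) := jl
          (PySem.List.pyRange 0 (qn + 1) 1).foldl (fun out n1 =>
            let top := if i == j then n1 else qn
            (PySem.List.pyRange 0 (top + 1) 1).foldl (fun out n2 =>
              out ++ [sort2 [l2, m2, n2] [l1, m1, n1]]) out) out) st.2
        (by_m, out))
      (PySem.Dict.empty, [])).2
    = specOut m qn rel := by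
  rw [B_fold_eq m qn (PySem.List.enumerate rel 0) [] PySem.Dict.empty []
      (by intro v; simp [bkt, PySem.Dict.getD_empty])]
  have := goB_eq m qn rel 0 (by omega)
  simp only [List.take_zero, List.drop_zero, Int.natCast_zero] at this
  rw [this]
  rfl

-- ===== VERDICT (by name: the statement is the Claim_ definition above) =====
theorem quadratic_modes_matching_m_spec : Claim_equal_quadratic_modes_matching_m := by
  intro m rl qn retro _
  unfold Spec_quadratic_modes_matching_m quadratic_modes_matching_m quadratic_modes_matching_m_alt
  rw [A_eq_specOut, B_eq_specOut]
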